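-- pv_equiv track=rewrite | github.com/Kalpit12/AksharJobs | backend/services/new_resume_service.py | _determine_primary_field
-- ===== SOURCE A (Python) =====
-- from typing import Dict, Any, Optional, List
--
-- def _determine_primary_field(technical_skills: List[str], experience: List[Dict[str, str]]) -> str:
--     """Determine primary field/industry based on skills and experience"""
--     # Check technical skills for field indicators
--     web_dev_skills = ['JavaScript', 'React', 'Angular', 'Vue.js', 'HTML', 'CSS', 'Node.js']
--     data_science_skills = ['Python', 'R', 'Machine Learning', 'Data Analysis', 'SQL', 'Pandas']
--     mobile_dev_skills = ['Swift', 'Kotlin', 'React Native', 'Flutter', 'iOS', 'Android']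
--     devops_skills = ['Docker', 'Kubernetes', 'AWS', 'Azure', 'Jenkins', 'Terraform']
--     backend_skills = ['Java', 'C#', '.NET', 'Spring', 'Django', 'Flask']
--
--     # Count skill matches
--     field_scores = {
--         'Web Development': sum(1 for skill in technical_skills if skill in web_dev_skills),
--         'Data Science': sum(1 for skill in technical_skills if skill in data_science_skills),
--         'Mobile Development': sum(1 for skill in technical_skills if skill in mobile_dev_skills),
--         'DevOps': sum(1 for skill in technical_skills if skill in devops_skills),
--         'Backend Development': sum(1 for skill in technical_skills if skill in backend_skills)
--     }
--
--     # Check experience titles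
--     for exp in experience:
--         title = exp.get('title', '').lower()
--         if 'data' in title or 'analyst' in title:
--             field_scores['Data Science'] += 2
--         elif 'mobile' in title or 'ios' in title or 'android' in title:
--             field_scores['Mobile Development'] += 2
--         elif 'devops' in title or 'infrastructure' in title:
--             field_scores['DevOps'] += 2
--         elif 'backend' in title or 'server' in title:
--             field_scores['Backend Development'] += 2
--         elif 'frontend' in title or 'web' in title:
--             field_scores['Web Development'] += 2
--
--     # Return field with highest score
--     if max(field_scores.values()) > 0:
--         return max(field_scores, key=field_scores.get)
--     else:
--         return "General Technology"
-- ===== SOURCE B (Python) =====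
-- def _determine_primary_field(technical_skills, experience):
--     categories = [
--         ('Web Development', ['JavaScript', 'React', 'Angular', 'Vue.js', 'HTML', 'CSS', 'Node.js']),
--         ('Data Science', ['Python', 'R', 'Machine Learning', 'Data Analysis', 'SQL', 'Pandas']),
--         ('Mobile Development', ['Swift', 'Kotlin', 'React Native', 'Flutter', 'iOS', 'Android']),
--         ('DevOps', ['Docker', 'Kubernetes', 'AWS', 'Azure', 'Jenkins', 'Terraform']),
--         ('Backend Development', ['Java', 'C#', '.NET', 'Spring', 'Django', 'Flask']),
--     ]
--     skill_to_field = {s: f for f, skills in categories for s in skills}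
--     scores = {f: 0 for f, _ in categories}
--     for skill in technical_skills:
--         f = skill_to_field.get(skill)
--         if f is not None:
--             scores[f] += 1
--     title_rules = [
--         (['data', 'analyst'], 'Data Science'),
--         (['mobile', 'ios', 'android'], 'Mobile Development'),
--         (['devops', 'infrastructure'], 'DevOps'),
--         (['backend', 'server'], 'Backend Development'),
--         (['frontend', 'web'], 'Web Development'),
--     ]
--     for exp in experience:
--         title = exp.get('title', '').lower()
--         for keywords, field in title_rules:
--             if any(k in title for k in keywords):
--                 scores[field] += 2
--                 break
--     best_field, best_score = 'General Technology', 0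
--     for f, s in scores.items():
--         if s > best_score:
--             best_field, best_score = f, s
--     return best_field
-- ===== Notes on version B (the rewrite author's own statement) =====
-- stated objective: faster
-- what changed: The five per-category scans over technical_skills are replaced by one pass with an inverted skill-to-field dict, the experience elif-chain by a first-match keyword-rule table, and the double max() by a single accumulator scan with a 'General Technology' seed.
import Mathlib
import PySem

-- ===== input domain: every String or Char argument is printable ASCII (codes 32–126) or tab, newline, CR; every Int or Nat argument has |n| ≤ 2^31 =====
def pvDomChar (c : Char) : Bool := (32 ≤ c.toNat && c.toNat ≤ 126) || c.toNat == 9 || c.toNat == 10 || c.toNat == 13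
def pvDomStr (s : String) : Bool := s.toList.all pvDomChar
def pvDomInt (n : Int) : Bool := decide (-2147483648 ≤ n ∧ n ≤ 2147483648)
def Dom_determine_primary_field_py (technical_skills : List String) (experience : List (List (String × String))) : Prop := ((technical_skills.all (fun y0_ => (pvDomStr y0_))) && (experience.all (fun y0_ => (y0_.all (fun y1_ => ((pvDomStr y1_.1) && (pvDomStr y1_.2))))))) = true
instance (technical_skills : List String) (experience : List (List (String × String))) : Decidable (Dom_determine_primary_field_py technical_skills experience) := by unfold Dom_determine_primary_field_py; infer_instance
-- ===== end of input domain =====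

-- B replaces A's five per-category scans by one pass over an inverted skill→field dict,
-- the elif-chain by a first-match keyword table, and the double max() by one accumulator scan (idiomatic).


-- ===== PORT A =====
def pvWebSkills : List String := ["JavaScript", "React", "Angular", "Vue.js", "HTML", "CSS", "Node.js"]
def pvDataSkills : List String := ["Python", "R", "Machine Learning", "Data Analysis", "SQL", "Pandas"]
def pvMobileSkills : List String := ["Swift", "Kotlin", "React Native", "Flutter", "iOS", "Android"]
def pvDevopsSkills : List String := ["Docker", "Kubernetes", "AWS", "Azure", "Jenkins", "Terraform"]
def pvBackendSkills : List String := ["Java", "C#", ".NET", "Spring", "Django", "Flask"]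

-- sum(1 for skill in technical_skills if skill in l)
def pvCountIn (ts : List String) (l : List String) : Int :=
  ts.foldl (fun acc s => if l.contains s then acc + 1 else acc) 0

-- one iteration of A's experience loop (the elif chain)
def pvAExpStep (scores : PySem.Dict String Int) (exp : List (String × String)) : PySem.Dict String Int :=
  let title := PySem.Str.lower ((PySem.Dict.mk exp).getD "title" "")
  if PySem.Str.isIn "data" title || PySem.Str.isIn "analyst" title then
    scores.modify "Data Science" 0 (· + 2)
  else if PySem.Str.isIn "mobile" title || PySem.Str.isIn "ios" title || PySem.Str.isIn "android" title then
    scores.modify "Mobile Development" 0 (· + 2)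
  else if PySem.Str.isIn "devops" title || PySem.Str.isIn "infrastructure" title then
    scores.modify "DevOps" 0 (· + 2)
  else if PySem.Str.isIn "backend" title || PySem.Str.isIn "server" title then
    scores.modify "Backend Development" 0 (· + 2)
  else if PySem.Str.isIn "frontend" title || PySem.Str.isIn "web" title then
    scores.modify "Web Development" 0 (· + 2)
  else scores

def pvAFinalScores (technical_skills : List String) (experience : List (List (String × String))) : PySem.Dict String Int :=
  experience.foldl pvAExpStep
    (((((PySem.Dict.empty.insert "Web Development" (pvCountIn technical_skills pvWebSkills)).insert
        "Data Science" (pvCountIn technical_skills pvDataSkills)).insert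
        "Mobile Development" (pvCountIn technical_skills pvMobileSkills)).insert
        "DevOps" (pvCountIn technical_skills pvDevopsSkills)).insert
        "Backend Development" (pvCountIn technical_skills pvBackendSkills))

def determine_primary_field_py (technical_skills : List String) (experience : List (List (String × String))) : String :=
  match PySem.List.max? (pvAFinalScores technical_skills experience).values (fun v => v) with
  | none => "General Technology"   -- unreachable: the dict always has five entries
  | some m =>
    if m > 0 then
      (PySem.List.max? (pvAFinalScores technical_skills experience).keys
        (fun k => (pvAFinalScores technical_skills experience).getD k 0)).getD "General Technology"
    else "General Technology"

-- ===== PORT B =====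
def pvCategories : List (String × List String) :=
  [("Web Development", pvWebSkills), ("Data Science", pvDataSkills),
   ("Mobile Development", pvMobileSkills), ("DevOps", pvDevopsSkills),
   ("Backend Development", pvBackendSkills)]

def pvSkillToField : PySem.Dict String String :=
  pvCategories.foldl (fun d p => p.2.foldl (fun d s => d.insert s p.1) d) PySem.Dict.empty

def pvInitScores : PySem.Dict String Int :=
  pvCategories.foldl (fun d p => d.insert p.1 0) PySem.Dict.empty

def pvTitleRules : List (List String × String) :=
  [(["data", "analyst"], "Data Science"),
   (["mobile", "ios", "android"], "Mobile Development"),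
   (["devops", "infrastructure"], "DevOps"),
   (["backend", "server"], "Backend Development"),
   (["frontend", "web"], "Web Development")]

def pvBSkillStep (scores : PySem.Dict String Int) (skill : String) : PySem.Dict String Int :=
  match pvSkillToField.get? skill with
  | some f => scores.modify f 0 (· + 1)
  | none => scores

-- inner 'for … break' loop of B's experience pass
def pvFirstRule (title : String) : List (List String × String) → Option String
  | [] => none
  | (ks, f) :: rest =>
    if ks.any (fun k => PySem.Str.isIn k title) then some f else pvFirstRule title rest

def pvBExpStep (scores : PySem.Dict String Int) (exp : List (String × String)) : PySem.Dict String Int :=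
  let title := PySem.Str.lower ((PySem.Dict.mk exp).getD "title" "")
  match pvFirstRule title pvTitleRules with
  | some f => scores.modify f 0 (· + 2)
  | none => scores

def determine_primary_field_py_alt (technical_skills : List String) (experience : List (List (String × String))) : String :=
  ((experience.foldl pvBExpStep (technical_skills.foldl pvBSkillStep pvInitScores)).items.foldl (fun best p => if p.2 > best.2 then p else best) ("General Technology", (0 : Int))).1

-- ===== PRECONDITION & SPEC =====
def Spec_determine_primary_field_py (technical_skills : List String) (experience : List (List (String × String))) (out : String) : Prop := out = determine_primary_field_py_alt technical_skills experience
instance (technical_skills : List String) (experience : List (List (String × String))) (out : String) : Decidable (Spec_determine_primary_field_py technical_skills experience out) := by unfold Spec_determine_primary_field_py; infer_instance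

-- ===== CLAIM (what is proved, stated in full; the proofs are below) =====
def Claim_equal_determine_primary_field_py : Prop := ∀ (technical_skills : List String) (experience : List (List (String × String))), Dom_determine_primary_field_py technical_skills experience → Spec_determine_primary_field_py technical_skills experience (determine_primary_field_py technical_skills experience)

-- ===== LEMMAS AND PROOFS =====

-- the common shape of both score dicts: five fixed keys in a fixed order
def pvShape (a b c d e : Int) : PySem.Dict String Int :=
  PySem.Dict.mk [("Web Development", a), ("Data Science", b), ("Mobile Development", c),
                 ("DevOps", d), ("Backend Development", e)]

-- tuple-level view of one skill step
def pvTSkill (v : Int × Int × Int × Int × Int) (s : String) : Int × Int × Int × Int × Int :=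
  (v.1 + (if pvWebSkills.contains s then 1 else 0),
   v.2.1 + (if pvDataSkills.contains s then 1 else 0),
   v.2.2.1 + (if pvMobileSkills.contains s then 1 else 0),
   v.2.2.2.1 + (if pvDevopsSkills.contains s then 1 else 0),
   v.2.2.2.2 + (if pvBackendSkills.contains s then 1 else 0))

-- tuple-level view of one experience step
def pvTExp (v : Int × Int × Int × Int × Int) (exp : List (String × String)) : Int × Int × Int × Int × Int :=
  let title := PySem.Str.lower ((PySem.Dict.mk exp).getD "title" "")
  if PySem.Str.isIn "data" title || PySem.Str.isIn "analyst" title then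
    (v.1, v.2.1 + 2, v.2.2.1, v.2.2.2.1, v.2.2.2.2)
  else if PySem.Str.isIn "mobile" title || PySem.Str.isIn "ios" title || PySem.Str.isIn "android" title then
    (v.1, v.2.1, v.2.2.1 + 2, v.2.2.2.1, v.2.2.2.2)
  else if PySem.Str.isIn "devops" title || PySem.Str.isIn "infrastructure" title then
    (v.1, v.2.1, v.2.2.1, v.2.2.2.1 + 2, v.2.2.2.2)
  else if PySem.Str.isIn "backend" title || PySem.Str.isIn "server" title then
    (v.1, v.2.1, v.2.2.1, v.2.2.2.1, v.2.2.2.2 + 2)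
  else if PySem.Str.isIn "frontend" title || PySem.Str.isIn "web" title then
    (v.1 + 2, v.2.1, v.2.2.1, v.2.2.2.1, v.2.2.2.2)
  else v

def pvFlatDict : PySem.Dict String String :=
  PySem.Dict.mk [("JavaScript", "Web Development"), ("React", "Web Development"), ("Angular", "Web Development"),
    ("Vue.js", "Web Development"), ("HTML", "Web Development"), ("CSS", "Web Development"),
    ("Node.js", "Web Development"), ("Python", "Data Science"), ("R", "Data Science"),
    ("Machine Learning", "Data Science"), ("Data Analysis", "Data Science"), ("SQL", "Data Science"),
    ("Pandas", "Data Science"), ("Swift", "Mobile Development"), ("Kotlin", "Mobile Development"),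
    ("React Native", "Mobile Development"), ("Flutter", "Mobile Development"), ("iOS", "Mobile Development"),
    ("Android", "Mobile Development"), ("Docker", "DevOps"), ("Kubernetes", "DevOps"), ("AWS", "DevOps"),
    ("Azure", "DevOps"), ("Jenkins", "DevOps"), ("Terraform", "DevOps"), ("Java", "Backend Development"),
    ("C#", "Backend Development"), (".NET", "Backend Development"), ("Spring", "Backend Development"),
    ("Django", "Backend Development"), ("Flask", "Backend Development")]

theorem pvSkillToField_eq : pvSkillToField = pvFlatDict := by decide

set_option maxHeartbeats 2000000 in
theorem pvStep_web (s : String) (h : pvWebSkills.contains s = true) (a b c d e : Int) :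
    pvBSkillStep (pvShape a b c d e) s =
      (fun v => pvShape v.1 v.2.1 v.2.2.1 v.2.2.2.1 v.2.2.2.2) (pvTSkill (a, b, c, d, e) s) := by
  simp only [pvWebSkills, List.contains_cons, List.contains_nil, Bool.or_false, Bool.or_eq_true,
    beq_iff_eq] at h
  rcases h with h | h | h | h | h | h | h <;> subst h <;>
    simp [pvBSkillStep, pvSkillToField_eq, pvFlatDict, pvTSkill, pvShape, PySem.Dict.get?,
      PySem.Dict.modify, PySem.Dict.contains, PySem.Dict.insert, PySem.Dict.getD, List.find?,
      Option.map, pvWebSkills, pvDataSkills, pvMobileSkills, pvDevopsSkills, pvBackendSkills]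

set_option maxHeartbeats 2000000 in
theorem pvStep_data (s : String) (h : pvDataSkills.contains s = true) (a b c d e : Int) :
    pvBSkillStep (pvShape a b c d e) s =
      (fun v => pvShape v.1 v.2.1 v.2.2.1 v.2.2.2.1 v.2.2.2.2) (pvTSkill (a, b, c, d, e) s) := by
  simp only [pvDataSkills, List.contains_cons, List.contains_nil, Bool.or_false, Bool.or_eq_true,
    beq_iff_eq] at h
  rcases h with h | h | h | h | h | h <;> subst h <;>
    simp [pvBSkillStep, pvSkillToField_eq, pvFlatDict, pvTSkill, pvShape, PySem.Dict.get?,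
      PySem.Dict.modify, PySem.Dict.contains, PySem.Dict.insert, PySem.Dict.getD, List.find?,
      Option.map, pvWebSkills, pvDataSkills, pvMobileSkills, pvDevopsSkills, pvBackendSkills]

set_option maxHeartbeats 2000000 in
theorem pvStep_mobile (s : String) (h : pvMobileSkills.contains s = true) (a b c d e : Int) :
    pvBSkillStep (pvShape a b c d e) s =
      (fun v => pvShape v.1 v.2.1 v.2.2.1 v.2.2.2.1 v.2.2.2.2) (pvTSkill (a, b, c, d, e) s) := by
  simp only [pvMobileSkills, List.contains_cons, List.contains_nil, Bool.or_false, Bool.or_eq_true,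
    beq_iff_eq] at h
  rcases h with h | h | h | h | h | h <;> subst h <;>
    simp [pvBSkillStep, pvSkillToField_eq, pvFlatDict, pvTSkill, pvShape, PySem.Dict.get?,
      PySem.Dict.modify, PySem.Dict.contains, PySem.Dict.insert, PySem.Dict.getD, List.find?,
      Option.map, pvWebSkills, pvDataSkills, pvMobileSkills, pvDevopsSkills, pvBackendSkills]

set_option maxHeartbeats 2000000 in
theorem pvStep_devops (s : String) (h : pvDevopsSkills.contains s = true) (a b c d e : Int) :
    pvBSkillStep (pvShape a b c d e) s =
      (fun v => pvShape v.1 v.2.1 v.2.2.1 v.2.2.2.1 v.2.2.2.2) (pvTSkill (a, b, c, d, e) s) := by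
  simp only [pvDevopsSkills, List.contains_cons, List.contains_nil, Bool.or_false, Bool.or_eq_true,
    beq_iff_eq] at h
  rcases h with h | h | h | h | h | h <;> subst h <;>
    simp [pvBSkillStep, pvSkillToField_eq, pvFlatDict, pvTSkill, pvShape, PySem.Dict.get?,
      PySem.Dict.modify, PySem.Dict.contains, PySem.Dict.insert, PySem.Dict.getD, List.find?,
      Option.map, pvWebSkills, pvDataSkills, pvMobileSkills, pvDevopsSkills, pvBackendSkills]

set_option maxHeartbeats 2000000 in
theorem pvStep_backend (s : String) (h : pvBackendSkills.contains s = true) (a b c d e : Int) :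
    pvBSkillStep (pvShape a b c d e) s =
      (fun v => pvShape v.1 v.2.1 v.2.2.1 v.2.2.2.1 v.2.2.2.2) (pvTSkill (a, b, c, d, e) s) := by
  simp only [pvBackendSkills, List.contains_cons, List.contains_nil, Bool.or_false, Bool.or_eq_true,
    beq_iff_eq] at h
  rcases h with h | h | h | h | h | h <;> subst h <;>
    simp [pvBSkillStep, pvSkillToField_eq, pvFlatDict, pvTSkill, pvShape, PySem.Dict.get?,
      PySem.Dict.modify, PySem.Dict.contains, PySem.Dict.insert, PySem.Dict.getD, List.find?,
      Option.map, pvWebSkills, pvDataSkills, pvMobileSkills, pvDevopsSkills, pvBackendSkills]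

theorem pvBeqComm (x y : String) : (x == y) = (y == x) := by
  cases h : x == y <;> cases h2 : y == x <;> simp_all [beq_iff_eq]

set_option maxHeartbeats 2000000 in
theorem pvStep_none (s : String) (h1 : pvWebSkills.contains s = false)
    (h2 : pvDataSkills.contains s = false) (h3 : pvMobileSkills.contains s = false)
    (h4 : pvDevopsSkills.contains s = false) (h5 : pvBackendSkills.contains s = false)
    (a b c d e : Int) :
    pvBSkillStep (pvShape a b c d e) s =
      (fun v => pvShape v.1 v.2.1 v.2.2.1 v.2.2.2.1 v.2.2.2.2) (pvTSkill (a, b, c, d, e) s) := by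
  simp only [pvWebSkills, pvDataSkills, pvMobileSkills, pvDevopsSkills, pvBackendSkills,
    List.contains_cons, List.contains_nil, Bool.or_eq_false_iff] at h1 h2 h3 h4 h5
  have hr : ∀ t : String, (s == t) = false → (t == s) = false := by
    intro t h; rw [pvBeqComm]; exact h
  simp [pvBSkillStep, pvSkillToField_eq, pvFlatDict, pvTSkill, pvShape, PySem.Dict.get?,
    List.find?, Option.map, pvWebSkills, pvDataSkills, pvMobileSkills, pvDevopsSkills,
    pvBackendSkills, hr, h1, h2, h3, h4, h5]
  simp_all

theorem pvBSkillStep_shape (a b c d e : Int) (s : String) :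
    pvBSkillStep (pvShape a b c d e) s =
      (fun v => pvShape v.1 v.2.1 v.2.2.1 v.2.2.2.1 v.2.2.2.2) (pvTSkill (a, b, c, d, e) s) := by
  by_cases h1 : pvWebSkills.contains s = true
  · exact pvStep_web s h1 a b c d e
  by_cases h2 : pvDataSkills.contains s = true
  · exact pvStep_data s h2 a b c d e
  by_cases h3 : pvMobileSkills.contains s = true
  · exact pvStep_mobile s h3 a b c d e
  by_cases h4 : pvDevopsSkills.contains s = true
  · exact pvStep_devops s h4 a b c d e
  by_cases h5 : pvBackendSkills.contains s = true
  · exact pvStep_backend s h5 a b c d e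
  simp only [Bool.not_eq_true] at h1 h2 h3 h4 h5
  exact pvStep_none s h1 h2 h3 h4 h5 a b c d e

set_option maxHeartbeats 2000000 in
theorem pvAExpStep_shape (a b c d e : Int) (exp : List (String × String)) :
    pvAExpStep (pvShape a b c d e) exp =
      (fun v => pvShape v.1 v.2.1 v.2.2.1 v.2.2.2.1 v.2.2.2.2) (pvTExp (a, b, c, d, e) exp) := by
  simp only [pvAExpStep, pvTExp]
  split_ifs <;>
    simp [pvShape, PySem.Dict.modify, PySem.Dict.contains, PySem.Dict.insert, PySem.Dict.getD,
      PySem.Dict.get?, List.find?, Option.map]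

set_option maxHeartbeats 2000000 in
theorem pvBExpStep_shape (a b c d e : Int) (exp : List (String × String)) :
    pvBExpStep (pvShape a b c d e) exp =
      (fun v => pvShape v.1 v.2.1 v.2.2.1 v.2.2.2.1 v.2.2.2.2) (pvTExp (a, b, c, d, e) exp) := by
  unfold pvBExpStep pvTExp
  simp only [pvTitleRules, pvFirstRule, List.any_cons, List.any_nil, Bool.or_false]
  split_ifs <;>
    simp_all [pvShape, PySem.Dict.modify, PySem.Dict.contains, PySem.Dict.insert, PySem.Dict.getD,
      PySem.Dict.get?, List.find?, Option.map]

theorem pvSkillFold (ts : List String) (a b c d e : Int) :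
    ts.foldl pvBSkillStep (pvShape a b c d e) =
      (fun w => pvShape w.1 w.2.1 w.2.2.1 w.2.2.2.1 w.2.2.2.2) (ts.foldl pvTSkill (a, b, c, d, e)) := by
  induction ts generalizing a b c d e with
  | nil => rfl
  | cons s rest ih =>
    simp only [List.foldl_cons]
    rw [pvBSkillStep_shape]
    rcases h : pvTSkill (a, b, c, d, e) s with ⟨a', b', c', d', e'⟩
    exact ih a' b' c' d' e'

theorem pvExpFoldA (l : List (List (String × String))) (a b c d e : Int) :
    l.foldl pvAExpStep (pvShape a b c d e) =
      (fun w => pvShape w.1 w.2.1 w.2.2.1 w.2.2.2.1 w.2.2.2.2) (l.foldl pvTExp (a, b, c, d, e)) := by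
  induction l generalizing a b c d e with
  | nil => rfl
  | cons x rest ih =>
    simp only [List.foldl_cons]
    rw [pvAExpStep_shape]
    rcases h : pvTExp (a, b, c, d, e) x with ⟨a', b', c', d', e'⟩
    exact ih a' b' c' d' e'

theorem pvExpFoldB (l : List (List (String × String))) (a b c d e : Int) :
    l.foldl pvBExpStep (pvShape a b c d e) =
      (fun w => pvShape w.1 w.2.1 w.2.2.1 w.2.2.2.1 w.2.2.2.2) (l.foldl pvTExp (a, b, c, d, e)) := by
  induction l generalizing a b c d e with
  | nil => rfl
  | cons x rest ih =>
    simp only [List.foldl_cons]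
    rw [pvBExpStep_shape]
    rcases h : pvTExp (a, b, c, d, e) x with ⟨a', b', c', d', e'⟩
    exact ih a' b' c' d' e'

theorem pvCountIn_acc (ts : List String) (l : List String) (acc : Int) :
    ts.foldl (fun acc s => if l.contains s then acc + 1 else acc) acc = acc + pvCountIn ts l := by
  induction ts generalizing acc with
  | nil => simp [pvCountIn]
  | cons s rest ih =>
    simp only [List.foldl_cons, ih]
    conv_rhs => rw [pvCountIn]
    simp only [List.foldl_cons, ih]
    split_ifs <;> omega

theorem pvCountIn_cons (s : String) (ts : List String) (l : List String) :
    pvCountIn (s :: ts) l = (if l.contains s then 1 else 0) + pvCountIn ts l := by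
  simp only [pvCountIn, List.foldl_cons]
  rw [pvCountIn_acc]
  split_ifs <;> simp [pvCountIn]

theorem pvTSkillFold (ts : List String) (a b c d e : Int) :
    ts.foldl pvTSkill (a, b, c, d, e) =
      (a + pvCountIn ts pvWebSkills, b + pvCountIn ts pvDataSkills, c + pvCountIn ts pvMobileSkills,
       d + pvCountIn ts pvDevopsSkills, e + pvCountIn ts pvBackendSkills) := by
  induction ts generalizing a b c d e with
  | nil => simp [pvCountIn]
  | cons s rest ih =>
    simp only [List.foldl_cons, pvTSkill]
    rw [ih]
    simp only [pvCountIn_cons, Prod.mk.injEq]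
    refine ⟨?_, ?_, ?_, ?_, ?_⟩ <;> (split_ifs <;> omega)

theorem pvTSkillFold_counts (ts : List String) :
    ts.foldl pvTSkill (0, 0, 0, 0, 0) =
      (pvCountIn ts pvWebSkills, pvCountIn ts pvDataSkills, pvCountIn ts pvMobileSkills,
       pvCountIn ts pvDevopsSkills, pvCountIn ts pvBackendSkills) := by
  rw [pvTSkillFold]
  simp

-- the two final extractions agree on any shaped dict
set_option maxHeartbeats 4000000 in
theorem pvFinal_eq (a b c d e : Int) :
    (match PySem.List.max? (pvShape a b c d e).values (fun v => v) with
     | none => "General Technology"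
     | some m =>
       if m > 0 then
         (PySem.List.max? (pvShape a b c d e).keys (fun k => (pvShape a b c d e).getD k 0)).getD "General Technology"
       else "General Technology") =
    ((pvShape a b c d e).items.foldl (fun best p => if p.2 > best.2 then p else best)
       ("General Technology", (0 : Int))).1 := by
  simp only [pvShape, PySem.List.max?, PySem.Dict.values, PySem.Dict.keys, PySem.Dict.getD,
    PySem.Dict.get?, List.foldl, List.map]
  split_ifs <;> simp_all <;> try omega
  all_goals (split_ifs <;> simp_all <;> try omega)
  all_goals (split_ifs <;> simp_all <;> try omega)
  all_goals (split_ifs <;> simp_all <;> omega)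

-- ===== VERDICT (by name: the statement is the Claim_ definition above) =====
theorem determine_primary_field_py_spec : Claim_equal_determine_primary_field_py := by
  intro ts exps _
  show _ = _
  have hinit : (((((PySem.Dict.empty.insert "Web Development" (pvCountIn ts pvWebSkills)).insert
        "Data Science" (pvCountIn ts pvDataSkills)).insert
        "Mobile Development" (pvCountIn ts pvMobileSkills)).insert
        "DevOps" (pvCountIn ts pvDevopsSkills)).insert
        "Backend Development" (pvCountIn ts pvBackendSkills)) =
      pvShape (pvCountIn ts pvWebSkills) (pvCountIn ts pvDataSkills) (pvCountIn ts pvMobileSkills)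
        (pvCountIn ts pvDevopsSkills) (pvCountIn ts pvBackendSkills) := rfl
  rcases hw : exps.foldl pvTExp (pvCountIn ts pvWebSkills, pvCountIn ts pvDataSkills,
      pvCountIn ts pvMobileSkills, pvCountIn ts pvDevopsSkills, pvCountIn ts pvBackendSkills)
    with ⟨y1, y2, y3, y4, y5⟩
  have hA : pvAFinalScores ts exps = pvShape y1 y2 y3 y4 y5 := by
    unfold pvAFinalScores
    rw [hinit, pvExpFoldA, hw]
  have hB : exps.foldl pvBExpStep (ts.foldl pvBSkillStep pvInitScores) = pvShape y1 y2 y3 y4 y5 := by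
    have h0 : pvInitScores = pvShape 0 0 0 0 0 := rfl
    rw [h0, pvSkillFold ts, pvTSkillFold_counts ts]
    show exps.foldl pvBExpStep (pvShape _ _ _ _ _) = _
    rw [pvExpFoldB, hw]
  unfold determine_primary_field_py determine_primary_field_py_alt
  rw [hA, hB]
  exact pvFinal_eq y1 y2 y3 y4 y5
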